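-- pv_equiv track=rewrite | github.com/BrettRey/erdos-problem-993 | scripts/leaf_critical_window_scan.py | encode_graph6_small
-- ===== SOURCE A (Python) =====
-- def encode_graph6_small(adj: list[list[int]]) -> str:
--     n = len(adj)
--     if n >= 63:
--         return "<n>=63"
--     aset = [set(nei) for nei in adj]
--     bits: list[int] = []
--     for j in range(1, n):
--         sj = aset[j]
--         for i in range(j):
--             bits.append(1 if i in sj else 0)
--     while len(bits) % 6:
--         bits.append(0)
--     out = [chr(n + 63)]
--     for k in range(0, len(bits), 6):
--         v = 0
--         for b in bits[k : k + 6]: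
--             v = (v << 1) | b
--         out.append(chr(v + 63))
--     return "".join(out)
-- ===== SOURCE B (Python) =====
-- def encode_graph6_small(adj: list[list[int]]) -> str:
--     n = len(adj)
--     if n >= 63:
--         return "<n>=63"
--     out = [chr(n + 63)]
--     v = 0
--     c = 0
--     for j in range(1, n):
--         sj = set(adj[j])
--         for i in range(j):
--             v = (v << 1) | (1 if i in sj else 0)
--             c += 1
--             if c == 6:
--                 out.append(chr(v + 63))
--                 v = 0
--                 c = 0
--     if c > 0:
--         v <<= 6 - c
--         out.append(chr(v + 63))
--     return "".join(out)
-- ===== Notes on version B (the rewrite author's own statement) =====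
-- stated objective: alternative
-- what changed: B streams the adjacency bits through a running accumulator/bit-count and emits each graph6 character as soon as 6 bits are collected (flushing a shifted remainder at the end), instead of A's three phases: materialise the full bits list, pad it to a multiple of 6, then chunk-and-pack it in a second pass.
import Mathlib
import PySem

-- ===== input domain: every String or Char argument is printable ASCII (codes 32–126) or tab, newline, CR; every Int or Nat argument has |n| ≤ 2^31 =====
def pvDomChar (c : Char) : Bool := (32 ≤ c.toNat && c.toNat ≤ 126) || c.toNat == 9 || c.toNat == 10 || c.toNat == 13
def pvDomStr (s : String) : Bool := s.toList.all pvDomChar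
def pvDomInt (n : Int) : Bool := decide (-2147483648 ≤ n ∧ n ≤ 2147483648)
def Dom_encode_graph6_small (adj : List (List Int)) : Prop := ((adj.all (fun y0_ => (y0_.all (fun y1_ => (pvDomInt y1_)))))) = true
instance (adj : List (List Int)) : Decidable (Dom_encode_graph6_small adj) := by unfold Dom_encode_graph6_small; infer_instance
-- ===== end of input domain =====

-- B streams bits into a running accumulator, emitting a character per 6 bits, instead of A's
-- build-bits-list / pad / chunk-and-pack phases; same return value, similar cost.

-- ===== PORT A =====
-- 'while len(bits) % 6: bits.append(0)' — the while loop, with fuel 6 (it appends at most 5 zeros)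
def pad6Go : Nat → List Int → List Int
  | 0, bits => bits
  | fuel + 1, bits => if bits.length % 6 = 0 then bits else pad6Go fuel (bits ++ [0])

def pad6 (bits : List Int) : List Int := pad6Go 6 bits

def encode_graph6_small (adj : List (List Int)) : String :=
  let n := adj.length
  if 63 ≤ n then "<n>=63" else
    let aset := adj.map (fun nei => PySem.Set.ofList nei)
    let bits := (PySem.List.pyRange 1 (n : Int) 1).foldl (fun bits j =>
        let sj := PySem.List.pyGetD aset j (PySem.Set.ofList [])
        (PySem.List.pyRange 0 j 1).foldl (fun bits i =>
            bits ++ [if PySem.Set.contains sj i then (1 : Int) else 0]) bits) []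
    let bits := pad6 bits
    let out := [Char.ofNat (n + 63)]
    let out := (PySem.List.pyRange 0 (bits.length : Int) 6).foldl (fun out k =>
        let v := (PySem.List.slice bits (some k) (some (k + 6))).foldl
            (fun (v : Int) b => Int.lor (v <<< (1 : Nat)) b) (0 : Int)  -- '|' on int ported as Int.lor
        out ++ [Char.ofNat ((v + 63).toNat)]) out
    String.ofList out

-- ===== PORT B =====
def encode_graph6_small_alt (adj : List (List Int)) : String :=
  let n := adj.length
  if 63 ≤ n then "<n>=63" else
    let st := (PySem.List.pyRange 1 (n : Int) 1).foldl (fun (st : Int × Nat × List Char) j =>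
        let sj := PySem.Set.ofList (PySem.List.pyGetD adj j [])
        (PySem.List.pyRange 0 j 1).foldl (fun (st : Int × Nat × List Char) i =>
            let v := Int.lor (st.1 <<< (1 : Nat)) (if PySem.Set.contains sj i then (1 : Int) else 0)
            let c := st.2.1 + 1
            if c = 6 then ((0 : Int), (0 : Nat), st.2.2 ++ [Char.ofNat ((v + 63).toNat)])
            else (v, c, st.2.2)) st)
      ((0 : Int), (0 : Nat), [Char.ofNat (n + 63)])
    let out := if 0 < st.2.1 then st.2.2 ++ [Char.ofNat (((st.1 <<< (6 - st.2.1)) + 63).toNat)]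
               else st.2.2
    String.ofList out

-- ===== PRECONDITION & SPEC =====
def Spec_encode_graph6_small (adj : List (List Int)) (out : String) : Prop := out = encode_graph6_small_alt adj
instance (adj : List (List Int)) (out : String) : Decidable (Spec_encode_graph6_small adj out) := by unfold Spec_encode_graph6_small; infer_instance

-- ===== CLAIM (what is proved, stated in full; the proofs are below) =====
def Claim_equal_encode_graph6_small : Prop := ∀ (adj : List (List Int)), Dom_encode_graph6_small adj → Spec_encode_graph6_small adj (encode_graph6_small adj)

-- ===== LEMMAS AND PROOFS =====

-- the packing step (v << 1) | b and the chr(v + 63) encoding, shared by both ports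
def pk (v b : Int) : Int := Int.lor (v <<< (1 : Nat)) b
def enc (v : Int) : Char := Char.ofNat ((v + 63).toNat)

-- the adjacency bit for pair (j, i)
def bitf (adj : List (List Int)) (j i : Int) : Int :=
  if PySem.Set.contains (PySem.Set.ofList (PySem.List.pyGetD adj j [])) i then 1 else 0

-- the full bit sequence both ports traverse
def bitsAll (adj : List (List Int)) (n : Int) : List Int :=
  (PySem.List.pyRange 1 n 1).flatMap (fun j => (PySem.List.pyRange 0 j 1).map (fun i => bitf adj j i))

-- B's per-bit state step
def bstep (st : Int × Nat × List Char) (b : Int) : Int × Nat × List Char :=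
  if st.2.1 + 1 = 6 then ((0 : Int), (0 : Nat), st.2.2 ++ [enc (pk st.1 b)])
  else (pk st.1 b, st.2.1 + 1, st.2.2)

-- B's output as a structural recursion over the bit list
def fstream (v : Int) (c : Nat) : List Int → List Char
  | [] => if 0 < c then [enc (v <<< (6 - c))] else []
  | b :: rest => if c + 1 = 6 then enc (pk v b) :: fstream 0 0 rest else fstream (pk v b) (c + 1) rest

-- A's chunk-and-pack pass as a structural recursion (6 bits at a time)
def chunks (bits : List Int) (out : List Char) : List Char :=
  if bits = [] then out
  else chunks (bits.drop 6) (out ++ [enc ((bits.take 6).foldl pk 0)])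
termination_by bits.length
decreasing_by
  rename_i h
  have : bits.length ≠ 0 := fun h0 => h (List.eq_nil_of_length_eq_zero h0)
  simp [List.length_drop]; omega

lemma fold_app {α β : Type} (g : α → β) (l : List α) : ∀ acc : List β,
    l.foldl (fun a i => a ++ [g i]) acc = acc ++ l.map g := by
  induction l with
  | nil => simp
  | cons x t ih => intro acc; simp [ih]

lemma nestedA (L : List Int) (inner : Int → List Int) (g : Int → Int → Int) : ∀ acc,
    L.foldl (fun acc j => (inner j).foldl (fun a i => a ++ [g j i]) acc) acc
      = acc ++ L.flatMap (fun j => (inner j).map (g j)) := by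
  induction L with
  | nil => simp
  | cons j t ih =>
    intro acc
    rw [List.foldl_cons, fold_app, ih]
    simp [List.flatMap_cons]

lemma nestedB {σ : Type} (S : σ → Int → σ) (L : List Int) (inner : Int → List Int)
    (g : Int → Int → Int) : ∀ st,
    L.foldl (fun st j => (inner j).foldl (fun st i => S st (g j i)) st) st
      = (L.flatMap (fun j => (inner j).map (g j))).foldl S st := by
  induction L with
  | nil => simp
  | cons j t ih => intro st; simp [List.foldl_map, ih, List.foldl_append]

lemma pad6Go_eq : ∀ (fuel : Nat) (bits : List Int), (6 - bits.length % 6) % 6 ≤ fuel →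
    pad6Go fuel bits = bits ++ List.replicate ((6 - bits.length % 6) % 6) 0 := by
  intro fuel
  induction fuel with
  | zero =>
    intro bits hf
    have h0 : (6 - bits.length % 6) % 6 = 0 := by omega
    rw [h0, pad6Go]
    simp
  | succ fuel ih =>
    intro bits hf
    by_cases h : bits.length % 6 = 0
    · rw [pad6Go, if_pos h, h]
      norm_num
    · rw [pad6Go, if_neg h]
      rw [ih (bits ++ [0]) (by simp; omega)]
      have h2 : ((6 - (bits ++ [0]).length % 6) % 6) + 1 = (6 - bits.length % 6) % 6 := by
        simp only [List.length_append, List.length_cons, List.length_nil]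
        omega
      rw [List.append_assoc, ← h2, List.singleton_append, ← List.replicate_succ]

lemma pad6_eq (bits : List Int) :
    pad6 bits = bits ++ List.replicate ((6 - bits.length % 6) % 6) 0 := by
  rw [pad6, pad6Go_eq 6 bits (by omega)]

lemma pad6_len (bits : List Int) : (pad6 bits).length % 6 = 0 := by
  rw [pad6_eq]; simp; omega

lemma lor_zero (v : Int) : Int.lor v 0 = v := by
  cases v <;> simp [Int.lor, Nat.ldiff, Nat.bitwise_zero_right]

lemma pk_zero (v : Int) : pk v 0 = v <<< (1 : Nat) := by
  simp [pk, lor_zero]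

lemma pk_eq (v b : Int) : Int.lor (v <<< (1 : Nat)) b = pk v b := rfl

lemma enc_eq (v : Int) : Char.ofNat ((v + 63).toNat) = enc v := rfl

lemma bstep_eq (st : Int × Nat × List Char) (b : Int) :
    (if st.2.1 + 1 = 6 then ((0 : Int), (0 : Nat), st.2.2 ++ [enc (pk st.1 b)])
     else (pk st.1 b, st.2.1 + 1, st.2.2)) = bstep st b := rfl

lemma fold_pk_replicate (k : Nat) : ∀ v : Int, (List.replicate k 0).foldl pk v = v <<< k := by
  induction k with
  | zero => intro v; simp
  | succ k ih =>
    intro v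
    rw [List.replicate_succ, List.foldl_cons, pk_zero, ih]
    simp [Int.shiftLeft_eq]
    ring

lemma pyRange6_mult (a : Int) (m : Nat) :
    PySem.List.pyRange a (a + 6 * m) 6 = (List.range m).map (fun k : Nat => a + 6 * (k : Int)) := by
  unfold PySem.List.pyRange
  rcases Nat.eq_zero_or_pos m with hm | hm
  · simp [hm]
  · have hlt : a < a + 6 * m := by omega
    simp only [if_neg (by norm_num : (6:Int) ≠ 0), if_pos (by norm_num : (0:Int) < 6), if_pos hlt]
    have : ((a + 6 * m - a + 6 - 1) / 6).toNat = m := by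
      have : a + 6 * m - a + 6 - 1 = 6 * m + 5 := by ring
      rw [this]
      omega
    rw [this]

lemma chunk_fold (m : Nat) : ∀ (full : List Int) (a : Nat) (out : List Char),
    full.length = a + 6 * m →
    ((List.range m).map (fun k : Nat => (a : Int) + 6 * (k : Int))).foldl
        (fun out k => out ++ [enc ((PySem.List.slice full (some k) (some (k + 6))).foldl pk 0)]) out
      = chunks (full.drop a) out := by
  induction m with
  | zero =>
    intro full a out h
    rw [chunks]
    simp [List.drop_eq_nil_of_le (by omega : full.length ≤ a)]
  | succ m ih =>
    intro full a out h
    rw [List.range_succ_eq_map]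
    simp only [List.map_cons, List.foldl_cons, List.map_map, Nat.cast_zero, mul_zero, add_zero]
    have hsl : PySem.List.slice full (some (a : Int)) (some ((a : Int) + 6)) = (full.drop a).take 6 := by
      have : ((a : Int) + 6) = ((a + 6 : Nat) : Int) := by push_cast; ring
      rw [this, PySem.List.slice_natCast]
      congr 1
      omega
    have hmap : (List.range m).map ((fun k : Nat => (a : Int) + 6 * (k : Int)) ∘ Nat.succ)
        = (List.range m).map (fun k : Nat => ((a + 6 : Nat) : Int) + 6 * (k : Int)) := by
      apply List.map_congr_left
      intro k _
      simp [Nat.succ_eq_add_one]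
      ring
    rw [hsl, hmap, ih full (a + 6) _ (by omega)]
    have hne : full.drop a ≠ [] := by
      intro h0
      have := congrArg List.length h0
      simp at this
      omega
    conv_rhs => rw [chunks, if_neg hne, List.drop_drop]

lemma bfold (bits : List Int) : ∀ (v : Int) (c : Nat) (out : List Char),
    (if 0 < (bits.foldl bstep (v, c, out)).2.1 then
        (bits.foldl bstep (v, c, out)).2.2
          ++ [enc ((bits.foldl bstep (v, c, out)).1 <<< (6 - (bits.foldl bstep (v, c, out)).2.1))]
      else (bits.foldl bstep (v, c, out)).2.2)
      = out ++ fstream v c bits := by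
  induction bits with
  | nil =>
    intro v c out
    simp only [List.foldl_nil, fstream]
    split_ifs <;> simp
  | cons b rest ih =>
    intro v c out
    simp only [List.foldl_cons, fstream, bstep]
    by_cases h6 : c + 1 = 6
    · simp only [if_pos h6, ih]
      simp
    · simp only [if_neg h6, ih]

lemma fstream_chunk : ∀ (chunk : List Int) (rest : List Int) (v : Int) (c : Nat), c < 6 →
    chunk.length + c = 6 →
    fstream v c (chunk ++ rest) = enc (chunk.foldl pk v) :: fstream 0 0 rest := by
  intro chunk
  induction chunk with
  | nil => intro rest v c hc hl; simp at hl; omega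
  | cons b t ih =>
    intro rest v c hc hl
    simp only [List.cons_append, fstream, List.foldl_cons]
    by_cases h6 : c + 1 = 6
    · have ht : t = [] := by
        simp at hl
        exact List.eq_nil_of_length_eq_zero (by omega)
      subst ht
      rw [if_pos h6]
      simp
    · rw [if_neg h6, ih rest (pk v b) (c + 1) (by omega) (by simp at hl ⊢; omega)]

lemma fstream_short : ∀ (bits : List Int) (v : Int) (c : Nat), 0 < c + bits.length →
    c + bits.length < 6 →
    fstream v c bits = [enc ((bits.foldl pk v) <<< (6 - (c + bits.length)))] := by
  intro bits
  induction bits with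
  | nil =>
    intro v c h0 h6
    simp only [fstream, List.foldl_nil, List.length_nil, Nat.add_zero] at *
    rw [if_pos (by omega)]
  | cons b t ih =>
    intro v c h0 h6
    simp only [fstream, List.foldl_cons, List.length_cons] at *
    rw [if_neg (by omega), ih (pk v b) (c + 1) (by omega) (by omega)]
    have e : c + 1 + t.length = c + (t.length + 1) := by omega
    rw [e]

lemma chunk_fold0 (m : Nat) (full : List Int) (out : List Char) (h : full.length = 6 * m) :
    ((List.range m).map (fun k : Nat => (0 : Int) + 6 * (k : Int))).foldl
        (fun out k => out ++ [enc ((PySem.List.slice full (some k) (some (k + 6))).foldl pk 0)]) out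
      = chunks full out := by
  have := chunk_fold m full 0 out (by omega)
  simpa only [Nat.cast_zero, List.drop_zero] using this

lemma chunks_pad6_eq_fstream (bits : List Int) : ∀ out : List Char,
    chunks (pad6 bits) out = out ++ fstream 0 0 bits := by
  induction hn : bits.length using Nat.strong_induction_on generalizing bits with
  | _ n ihn =>
  intro out
  by_cases h6 : 6 ≤ bits.length
  · have hbits : bits = bits.take 6 ++ bits.drop 6 := (List.take_append_drop 6 bits).symm
    have htl : (bits.take 6).length = 6 := by simp; omega
    have hpad : pad6 bits = bits.take 6 ++ pad6 (bits.drop 6) := by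
      rw [pad6_eq, pad6_eq]
      conv_lhs => rw [hbits]
      rw [List.append_assoc]
      congr 2
      simp
      omega
    rw [hpad, chunks]
    rw [if_neg (by simp [← List.length_eq_zero_iff]; omega)]
    have ht6 : (bits.take 6 ++ pad6 (bits.drop 6)).take 6 = bits.take 6 := by
      rw [List.take_append_of_le_length (by omega)]
      simp
    have hd6 : (bits.take 6 ++ pad6 (bits.drop 6)).drop 6 = pad6 (bits.drop 6) := by
      rw [List.drop_append_of_le_length (by omega)]
      simp
    rw [ht6, hd6, ihn (bits.drop 6).length (by simp; omega) _ rfl]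
    conv_rhs => rw [hbits]
    rw [fstream_chunk (bits.take 6) (bits.drop 6) 0 0 (by omega) (by omega)]
    simp
  · rcases Nat.eq_zero_or_pos bits.length with h0 | h0
    · have : bits = [] := List.eq_nil_of_length_eq_zero h0
      subst this
      rw [pad6_eq]
      simp [chunks, fstream]
    · have hpad : pad6 bits = bits ++ List.replicate (6 - bits.length) 0 := by
        rw [pad6_eq]
        congr 2
        omega
      rw [hpad, chunks]
      rw [if_neg (by simp [← List.length_eq_zero_iff]; omega)]
      have hlen : (bits ++ List.replicate (6 - bits.length) 0).length = 6 := by simp; omega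
      have htake : (bits ++ List.replicate (6 - bits.length) 0).take 6 = bits ++ List.replicate (6 - bits.length) 0 := by
        rw [List.take_of_length_le (by omega)]
      have hdrop : (bits ++ List.replicate (6 - bits.length) 0).drop 6 = [] := by
        rw [List.drop_eq_nil_of_le (by omega)]
      rw [htake, hdrop, chunks]
      rw [if_pos rfl]
      rw [List.foldl_append, fold_pk_replicate]
      rw [fstream_short bits 0 0 (by omega) (by omega)]
      simp

theorem encode_graph6_small_spec : Claim_equal_encode_graph6_small := by
  intro adj _
  unfold Spec_encode_graph6_small encode_graph6_small encode_graph6_small_alt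
  by_cases h : 63 ≤ adj.length
  · simp only [if_pos h]
  · simp only [if_neg h]
    simp only [pk_eq, enc_eq, bstep_eq, PySem.List.pyGetD_map]
    rw [nestedA, nestedB, bfold]
    simp only [List.nil_append, show (fun (v b : Int) => pk v b) = pk from rfl]
    set B := ((PySem.List.pyRange 1 (adj.length : Int) 1).flatMap
        (fun j => (PySem.List.pyRange 0 j 1).map
          (fun i => if PySem.Set.contains (PySem.Set.ofList (PySem.List.pyGetD adj j [])) i = true then (1 : Int) else 0))) with hB
    obtain ⟨m, hm⟩ : ∃ m : Nat, (pad6 B).length = 6 * m := by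
      have := pad6_len B
      exact ⟨(pad6 B).length / 6, by omega⟩
    have hcast : ((pad6 B).length : Int) = (0 : Int) + 6 * (m : Int) := by
      rw [hm]; push_cast; ring
    rw [hcast, pyRange6_mult, chunk_fold0 m _ _ hm, chunks_pad6_eq_fstream]
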